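-- pv_equiv track=rewrite | github.com/vibofl1/gfg-_POTD | Find Total Time Taken.py | totalTime
-- ===== SOURCE A (Python) =====
-- from typing import List
--
-- def totalTime(n : int, arr : List[int], time : List[int]) -> int:
--     # code here
--     ans=-1
--     mp={}
--     for x in arr:
--         if x in mp:
--             mp[x]+=1
--             ans+=time[x-1]
--         else:
--             mp[x]=1
--             ans+=1
--     return ans
-- ===== SOURCE B (Python) =====
-- from typing import List
--
-- def totalTime(n : int, arr : List[int], time : List[int]) -> int:
--     # Aggregate first: frequency table, then a closed-form contribution per distinct value.
--     freq = {}
--     for x in arr: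
--         freq[x] = freq.get(x, 0) + 1
--     ans = len(freq) - 1
--     for x, c in freq.items():
--         if c > 1:
--             ans += (c - 1) * time[x - 1]
--     return ans
-- ===== Notes on version B (the rewrite author's own statement) =====
-- stated objective: alternative
-- what changed: B builds a frequency table of arr in one pass and then sums a closed-form (count-1)*time[x-1] per distinct value plus len(table)-1, instead of A's per-element seen-before membership branch accumulating as it scans.
import Mathlib
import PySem

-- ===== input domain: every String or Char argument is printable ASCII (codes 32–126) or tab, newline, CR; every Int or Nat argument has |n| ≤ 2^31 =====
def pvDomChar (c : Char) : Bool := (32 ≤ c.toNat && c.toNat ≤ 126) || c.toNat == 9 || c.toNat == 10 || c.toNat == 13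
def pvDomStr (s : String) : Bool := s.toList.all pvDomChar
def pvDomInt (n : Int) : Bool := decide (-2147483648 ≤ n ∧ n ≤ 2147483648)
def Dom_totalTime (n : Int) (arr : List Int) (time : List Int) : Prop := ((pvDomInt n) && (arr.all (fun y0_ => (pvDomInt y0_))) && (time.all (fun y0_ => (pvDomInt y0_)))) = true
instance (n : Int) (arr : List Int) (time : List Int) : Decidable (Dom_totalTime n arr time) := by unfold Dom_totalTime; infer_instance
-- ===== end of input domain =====

-- B replaces A's in-order seen-before membership branch by a frequency table built first,
-- then a closed-form (count-1)*time[x-1] contribution per distinct value; same O(n) cost.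

-- ===== PORT A =====
-- literal port of A's loop; returns none exactly where Python's time[x-1] raises IndexError
def totalTimeLoopA (time : List Int) : List Int → Int → PySem.Dict Int Int → Option Int
  | [], ans, _ => some ans
  | x :: xs, ans, mp =>
    match PySem.Dict.get? mp x with
    | some c =>
      match PySem.List.pyGet? time (x - 1) with
      | some tv => totalTimeLoopA time xs (ans + tv) (mp.insert x (c + 1))
      | none => none
    | none => totalTimeLoopA time xs (ans + 1) (mp.insert x 1)

def totalTime (n : Int) (arr : List Int) (time : List Int) : Int :=
  (totalTimeLoopA time arr (-1) PySem.Dict.empty).getD 0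

-- ===== PORT B =====
def totalTime_alt (n : Int) (arr : List Int) (time : List Int) : Int :=
  let freq := arr.foldl (fun d x => d.insert x (d.getD x 0 + 1)) (PySem.Dict.empty : PySem.Dict Int Int)
  freq.items.foldl
    (fun s p => if 1 < p.2 then s + (p.2 - 1) * ((PySem.List.pyGet? time (p.1 - 1)).getD 0) else s)
    ((freq.size : Int) - 1)

-- ===== PRECONDITION & SPEC =====
-- Pre_ excludes exactly the inputs on which A raises IndexError: a value occurring at least
-- twice in arr whose index x-1 is out of Python range for time (both A and B raise there).
def Pre_totalTime (n : Int) (arr : List Int) (time : List Int) : Prop :=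
  ∀ x ∈ arr, 2 ≤ arr.count x → PySem.Raise.InRange time.length (x - 1)

instance (n : Int) (arr : List Int) (time : List Int) : Decidable (Pre_totalTime n arr time) := by
  unfold Pre_totalTime; infer_instance

def pvWitness_totalTime : Int × List Int × List Int := (3, [1, 2, 1], [5, 10, 7])

def Spec_totalTime (n : Int) (arr : List Int) (time : List Int) (out : Int) : Prop := out = totalTime_alt n arr time
instance (n : Int) (arr : List Int) (time : List Int) (out : Int) : Decidable (Spec_totalTime n arr time out) := by unfold Spec_totalTime; infer_instance

-- ===== CLAIM (what is proved, stated in full; the proofs are below) =====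
def Claim_equal_totalTime : Prop := ∀ (n : Int) (arr : List Int) (time : List Int), Dom_totalTime n arr time → Pre_totalTime n arr time → Spec_totalTime n arr time (totalTime n arr time)

-- ===== LEMMAS AND PROOFS =====

-- t-value lookup shared by the proof-side abbreviations
def pvT (time : List Int) (x : Int) : Int := (PySem.List.pyGet? time (x - 1)).getD 0

-- A's accumulated sum, abstracted over the set of already-seen values
def gA (time : List Int) : List Int → List Int → Int
  | [], _ => 0
  | x :: xs, seen => (if x ∈ seen then pvT time x else 1) + gA time xs (x :: seen)

-- first occurrences of values of l not in seen, in order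
def newsL : List Int → List Int → List Int
  | [], _ => []
  | x :: xs, seen => if x ∈ seen then newsL xs seen else x :: newsL xs (x :: seen)

theorem gA_congr (time : List Int) (l : List Int) : ∀ s₁ s₂ : List Int,
    (∀ y, y ∈ s₁ ↔ y ∈ s₂) → gA time l s₁ = gA time l s₂ := by
  induction l with
  | nil => intro _ _ _; rfl
  | cons x xs ih =>
    intro s₁ s₂ h
    simp only [gA]
    rw [ih (x :: s₁) (x :: s₂) (by intro y; simp [h y])]
    by_cases hx : x ∈ s₁
    · rw [if_pos hx, if_pos ((h x).mp hx)]
    · rw [if_neg hx, if_neg (fun hc => hx ((h x).mpr hc))]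

theorem newsL_congr (l : List Int) : ∀ s₁ s₂ : List Int,
    (∀ y, y ∈ s₁ ↔ y ∈ s₂) → newsL l s₁ = newsL l s₂ := by
  induction l with
  | nil => intro _ _ _; rfl
  | cons x xs ih =>
    intro s₁ s₂ h
    simp only [newsL]
    by_cases hx : x ∈ s₁
    · rw [if_pos hx, if_pos ((h x).mp hx), ih s₁ s₂ h]
    · rw [if_neg hx, if_neg (fun hc => hx ((h x).mpr hc)),
        ih (x :: s₁) (x :: s₂) (by intro y; simp [h y])]

theorem loopA_eq_gA (time : List Int) (l : List Int) : ∀ (mp : PySem.Dict Int Int) (ans : Int),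
    (∀ x ∈ l, (mp.contains x = true ∨ 2 ≤ l.count x) → PySem.Raise.InRange time.length (x - 1)) →
    totalTimeLoopA time l ans mp = some (ans + gA time l mp.keys) := by
  induction l with
  | nil => intro mp ans _; simp [totalTimeLoopA, gA]
  | cons x xs ih =>
    intro mp ans h
    simp only [totalTimeLoopA, gA]
    cases hg : PySem.Dict.get? mp x with
    | some c =>
      have hcont : mp.contains x = true := by
        rw [PySem.Dict.contains_eq_isSome_get?, hg]; rfl
      have hin : PySem.Raise.InRange time.length (x - 1) :=
        h x (List.mem_cons_self) (Or.inl hcont)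
      cases hp : PySem.List.pyGet? time (x - 1) with
      | none => exact absurd hin ((PySem.List.pyGet?_eq_none_iff _ _).mp hp)
      | some tv =>
        dsimp only
        rw [ih (mp.insert x (c + 1)) (ans + tv) ?_]
        · have hmem : x ∈ mp.keys := (PySem.Dict.contains_iff_mem_keys _ _).mp hcont
          have : gA time xs (mp.insert x (c + 1)).keys = gA time xs (x :: mp.keys) := by
            apply gA_congr
            intro y; rw [PySem.Dict.mem_keys_insert]; simp
          rw [this, if_pos hmem]
          have : pvT time x = tv := by simp [pvT, hp]
          rw [this]; ring_nf
        · intro y hy hor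
          rcases hor with hc | hcnt
          · rw [PySem.Dict.contains_insert] at hc
            rcases Bool.or_eq_true_iff.mp hc with h1 | h2
            · have : y = x := by simpa using h1
              subst this; exact hin
            · exact h y (List.mem_cons_of_mem _ hy) (Or.inl h2)
          · apply h y (List.mem_cons_of_mem _ hy)
            right
            rw [List.count_cons] at *
            split at * <;> omega
    | none =>
      have hcont : mp.contains x = false := by
        rw [PySem.Dict.contains_eq_isSome_get?, hg]; rfl
      have hnmem : x ∉ mp.keys := by
        intro hm
        rw [(PySem.Dict.contains_iff_mem_keys _ _).mpr hm] at hcont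
        exact Bool.true_eq_false.mp hcont
      dsimp only
      rw [ih (mp.insert x 1) (ans + 1) ?_]
      · have : gA time xs (mp.insert x 1).keys = gA time xs (x :: mp.keys) := by
          apply gA_congr
          intro y; rw [PySem.Dict.mem_keys_insert]; simp
        rw [this, if_neg hnmem]; ring_nf
      · intro y hy hor
        rcases hor with hc | hcnt
        · rw [PySem.Dict.contains_insert] at hc
          rcases Bool.or_eq_true_iff.mp hc with h1 | h2
          · have hyx : y = x := by simpa using h1
            subst hyx
            apply h y List.mem_cons_self
            right
            have h2 : 0 < xs.count y := List.count_pos_iff.mpr hy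
            rw [List.count_cons]
            simp
            omega
          · exact h y (List.mem_cons_of_mem _ hy) (Or.inl h2)
        · apply h y (List.mem_cons_of_mem _ hy)
          right
          rw [List.count_cons] at *
          split at * <;> omega

theorem gA_eq_formula (time : List Int) (l : List Int) : ∀ seen : List Int,
    gA time l seen = (l.map (pvT time)).sum - ((newsL l seen).map (pvT time)).sum
      + ((newsL l seen).length : Int) := by
  induction l with
  | nil => intro seen; simp [gA, newsL]
  | cons x xs ih =>
    intro seen
    simp only [gA, newsL, List.map_cons, List.sum_cons]
    by_cases hx : x ∈ seen
    · rw [if_pos hx, if_pos hx, ih (x :: seen),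
        newsL_congr xs (x :: seen) seen ?_]
      · ring
      · intro y
        simp only [List.mem_cons]
        constructor
        · rintro (rfl | h)
          · exact hx
          · exact h
        · intro h; exact Or.inr h
    · rw [if_neg hx, if_neg hx, ih (x :: seen)]
      simp only [List.map_cons, List.sum_cons, List.length_cons]
      push_cast
      ring

theorem update_eq_append_newsL (l : List Int) : ∀ seen : List Int,
    PySem.Set.update seen l = seen ++ newsL l seen := by
  induction l with
  | nil => intro seen; simp [PySem.Set.update_nil, newsL]
  | cons x xs ih =>
    intro seen
    rw [PySem.Set.update_cons]
    simp only [newsL, PySem.Set.add]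
    by_cases hx : x ∈ seen
    · rw [if_pos (by simpa using hx), if_pos hx, ih seen]
    · rw [if_neg (by simpa using hx), if_neg hx, ih (seen ++ [x]),
        newsL_congr xs (seen ++ [x]) (x :: seen) (by intro y; simp; tauto)]
      simp

theorem newsL_nil_eq_ofList (l : List Int) : newsL l [] = PySem.Set.ofList l := by
  have := update_eq_append_newsL l []
  rw [PySem.Set.update_nil_left] at this
  simpa using this.symm

-- B's inner fold as init + sum
theorem foldl_if_add (time : List Int) (l : List (Int × Int)) : ∀ a : Int,
    l.foldl (fun s p => if 1 < p.2 then s + (p.2 - 1) * ((PySem.List.pyGet? time (p.1 - 1)).getD 0) else s) a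
      = a + (l.map (fun p => if 1 < p.2 then (p.2 - 1) * pvT time p.1 else 0)).sum := by
  induction l with
  | nil => intro a; simp
  | cons p ps ih =>
    intro a
    simp only [List.foldl_cons, List.map_cons, List.sum_cons]
    rw [ih]
    by_cases hp : 1 < p.2
    · rw [if_pos hp, if_pos hp]
      simp only [pvT]
      ring
    · rw [if_neg hp, if_neg hp]
      ring

theorem sum_map_sub (f g : Int → Int) (l : List Int) :
    (l.map (fun k => f k - g k)).sum = (l.map f).sum - (l.map g).sum := by
  induction l with
  | nil => simp
  | cons x xs ih => simp [ih]; ring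

-- Σ_{x∈l} t x  =  Σ over distinct values of count·t
theorem sum_map_eq_sum_count (time : List Int) (l : List Int) :
    (l.map (pvT time)).sum
      = ((PySem.Set.ofList l).map (fun k => (l.count k : Int) * pvT time k)).sum := by
  rw [Finset.sum_list_map_count]
  rw [← List.sum_toFinset _ (PySem.Set.nodup_ofList l)]
  have hset : (PySem.Set.ofList l).toFinset = l.toFinset := by
    ext y; simp [PySem.Set.mem_ofList]
  rw [hset]
  apply Finset.sum_congr rfl
  intro m _
  simp

theorem totalTime_alt_eval (n : Int) (arr time : List Int) :
    totalTime_alt n arr time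
      = ((PySem.Set.ofList arr).length : Int) - 1
        + ((PySem.Set.ofList arr).map
            (fun k => if 1 < (arr.count k : Int) then ((arr.count k : Int) - 1) * pvT time k else 0)).sum := by
  unfold totalTime_alt
  rw [PySem.Dict.foldl_insert_getD_add_one_eq_counter, foldl_if_add]
  simp only [PySem.Dict.size, PySem.Dict.items_counter, List.length_map, List.map_map,
    Function.comp_def]

theorem count_term_eq (c tv : Int) (h : 1 ≤ c) :
    (if 1 < c then (c - 1) * tv else 0) = (c - 1) * tv := by
  by_cases hc : 1 < c
  · rw [if_pos hc]
  · rw [if_neg hc]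
    have : c = 1 := by omega
    simp [this]

-- ===== VERDICT (by name: the statement is the Claim_ definition above) =====
theorem totalTime_spec : Claim_equal_totalTime := by
  intro n arr time _ hpre
  unfold Spec_totalTime
  unfold totalTime
  rw [loopA_eq_gA time arr PySem.Dict.empty (-1) ?_]
  · rw [PySem.Dict.keys_empty, gA_eq_formula, newsL_nil_eq_ofList]
    rw [totalTime_alt_eval]
    set S := PySem.Set.ofList arr with hS
    have hmapeq : S.map (fun k => if 1 < (arr.count k : Int) then ((arr.count k : Int) - 1) * pvT time k else 0)
        = S.map (fun k => ((arr.count k : Int) - 1) * pvT time k) := by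
      apply List.map_congr_left
      intro k hk
      have hkmem : k ∈ arr := (PySem.Set.mem_ofList _ _).mp hk
      have : 0 < arr.count k := List.count_pos_iff.mpr hkmem
      exact count_term_eq _ _ (by exact_mod_cast this)
    rw [hmapeq]
    have hsub : (S.map (fun k => ((arr.count k : Int) - 1) * pvT time k)).sum
        = (S.map (fun k => (arr.count k : Int) * pvT time k)).sum - (S.map (pvT time)).sum := by
      have := sum_map_sub (fun k => (arr.count k : Int) * pvT time k) (pvT time) S
      rw [← this]
      congr 1
      apply List.map_congr_left
      intro k _; ring
    rw [hsub, sum_map_eq_sum_count time arr, ← hS]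
    simp only [Option.getD_some]
    ring
  · intro x hx hor
    rcases hor with hc | hcnt
    · rw [PySem.Dict.contains_empty] at hc
      exact absurd hc (by simp)
    · exact hpre x hx hcnt
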